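-- pv_equiv track=rewrite | github.com/bakerd23/Moats-Newcomers | acc_stats_scraper.py | _extract_rsci_rank
-- ===== SOURCE A (Python) =====
-- def _extract_rsci_rank(page_text):
--     key = "RSCI Top 100:"
--     idx = page_text.find(key)
--     if idx == -1:
--         return ""
--     tail = page_text[idx + len(key) : idx + len(key) + 60]
--     digits = ""
--     for ch in tail:
--         if ch.isdigit():
--             digits += ch
--         elif digits:
--             break
--     return digits
-- ===== SOURCE B (Python) =====
-- def _extract_rsci_rank(page_text):
--     key = "RSCI Top 100:"
--     idx = page_text.find(key)
--     if idx == -1: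
--         return ""
--     start = idx + len(key)
--     tail = page_text[start : start + 60]
--     n = len(tail)
--     i = 0
--     while i < n and not tail[i].isdigit():
--         i += 1
--     j = i
--     while j < n and tail[j].isdigit():
--         j += 1
--     return tail[i:j]
-- ===== Notes on version B (the rewrite author's own statement) =====
-- stated objective: alternative
-- what changed: Replaces the accumulate-characters-and-break loop with a two-phase index scan (skip non-digits, then advance past the digit run) returning a single slice tail[i:j], so no string is built incrementally.
import Mathlib
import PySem

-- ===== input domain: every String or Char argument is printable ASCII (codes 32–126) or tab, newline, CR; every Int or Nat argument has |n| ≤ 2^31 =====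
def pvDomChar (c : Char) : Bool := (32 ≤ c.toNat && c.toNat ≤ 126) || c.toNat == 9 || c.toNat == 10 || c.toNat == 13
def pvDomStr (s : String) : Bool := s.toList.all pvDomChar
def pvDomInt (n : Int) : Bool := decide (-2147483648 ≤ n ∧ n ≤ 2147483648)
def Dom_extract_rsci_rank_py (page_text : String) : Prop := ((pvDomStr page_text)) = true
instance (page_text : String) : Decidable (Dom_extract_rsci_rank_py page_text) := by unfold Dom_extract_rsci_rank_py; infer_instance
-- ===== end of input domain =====

-- B replaces A's accumulate-and-break loop with a two-phase index scan and one final slice; same cost, no incremental string build.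

-- ===== PORT A =====
-- the for-loop of A: accumulate digits, break on the first non-digit after a digit
def pvLoopA (tail : List Char) (digits : List Char) : List Char :=
  match tail with
  | [] => digits
  | c :: rest =>
    if PySem.Chars.isdigit c then pvLoopA rest (digits ++ [c])
    else if digits ≠ [] then digits
    else pvLoopA rest digits

def extract_rsci_rank_py (page_text : String) : String :=
  let key := "RSCI Top 100:"
  let idx := PySem.Str.find page_text key
  if idx = -1 then ""
  else
    let tail := PySem.Str.slice page_text (some (idx + (PySem.Str.len key : Int)))
      (some (idx + (PySem.Str.len key : Int) + 60))
    String.ofList (pvLoopA tail.toList [])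

-- ===== PORT B =====
-- first while loop of B: advance i past non-digits (i < n guards the access, so getD is exact)
def pvSkipND (l : List Char) (n i : Nat) : Nat :=
  if i < n ∧ ¬ PySem.Chars.isdigit (l.getD i ' ') then pvSkipND l n (i + 1) else i
termination_by n - i

-- second while loop of B: advance j past digits
def pvTakeD (l : List Char) (n j : Nat) : Nat :=
  if j < n ∧ PySem.Chars.isdigit (l.getD j ' ') then pvTakeD l n (j + 1) else j
termination_by n - j

def extract_rsci_rank_py_alt (page_text : String) : String :=
  let key := "RSCI Top 100:"
  let idx := PySem.Str.find page_text key
  if idx = -1 then ""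
  else
    let start := idx + (PySem.Str.len key : Int)
    let tail := (PySem.Str.slice page_text (some start) (some (start + 60))).toList
    let n := tail.length
    let i := pvSkipND tail n 0
    let j := pvTakeD tail n i
    String.ofList (PySem.List.slice tail (some (i : Int)) (some (j : Int)))

-- ===== PRECONDITION & SPEC =====
def Spec_extract_rsci_rank_py (page_text : String) (out : String) : Prop := out = extract_rsci_rank_py_alt page_text
instance (page_text : String) (out : String) : Decidable (Spec_extract_rsci_rank_py page_text out) := by unfold Spec_extract_rsci_rank_py; infer_instance

-- ===== CLAIM (what is proved, stated in full; the proofs are below) =====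
def Claim_equal_extract_rsci_rank_py : Prop := ∀ (page_text : String), Dom_extract_rsci_rank_py page_text → Spec_extract_rsci_rank_py page_text (extract_rsci_rank_py page_text)

-- ===== LEMMAS AND PROOFS =====

-- A's loop with a nonempty accumulator takes exactly the leading digit run
theorem pvLoopA_ne_nil (l : List Char) (acc : List Char) (h : acc ≠ []) :
    pvLoopA l acc = acc ++ l.takeWhile PySem.Chars.isdigit := by
  induction l generalizing acc with
  | nil => simp [pvLoopA]
  | cons c rest ih =>
    by_cases hc : PySem.Chars.isdigit c
    · simp [pvLoopA, hc, ih (acc ++ [c]) (by simp)]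
    · simp [pvLoopA, hc, h]

-- A's loop from the empty accumulator: drop non-digits, then take the digit run
theorem pvLoopA_nil (l : List Char) :
    pvLoopA l [] =
      (l.dropWhile (fun c => ¬ PySem.Chars.isdigit c)).takeWhile PySem.Chars.isdigit := by
  induction l with
  | nil => simp [pvLoopA]
  | cons c rest ih =>
    by_cases hc : PySem.Chars.isdigit c
    · simp [pvLoopA, hc, pvLoopA_ne_nil rest [c] (by simp)]
    · simp [pvLoopA, hc, ih]

theorem pvSkipND_spec (l : List Char) (i : Nat) (hi : i ≤ l.length) :
    i ≤ pvSkipND l l.length i ∧ pvSkipND l l.length i ≤ l.length ∧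
      l.drop (pvSkipND l l.length i) =
        (l.drop i).dropWhile (fun c => ¬ PySem.Chars.isdigit c) := by
  by_cases h : i < l.length ∧ ¬ PySem.Chars.isdigit (l.getD i ' ')
  · obtain ⟨h1, h2⟩ := h
    have hg : l.getD i ' ' = l[i] := List.getD_eq_getElem l ' ' h1
    have hdrop : l.drop i = l[i] :: l.drop (i + 1) := (List.getElem_cons_drop h1).symm
    obtain ⟨a1, a2, a3⟩ := pvSkipND_spec l (i + 1) (by omega)
    rw [pvSkipND, if_pos ⟨h1, h2⟩]
    refine ⟨by omega, a2, ?_⟩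
    rw [a3, hdrop, List.dropWhile_cons]
    simp [hg ▸ h2]
  · rw [pvSkipND, if_neg h]
    refine ⟨le_refl _, hi, ?_⟩
    rcases Nat.lt_or_ge i l.length with h1 | h1
    · have h2 : PySem.Chars.isdigit (l.getD i ' ') := by tauto
      have hg : l.getD i ' ' = l[i] := List.getD_eq_getElem l ' ' h1
      rw [(List.getElem_cons_drop h1).symm, List.dropWhile_cons]
      simp [hg ▸ h2]
    · simp [List.drop_eq_nil_of_le h1]
termination_by l.length - i

theorem pvTakeD_ge (l : List Char) (j : Nat) : j ≤ pvTakeD l l.length j := by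
  by_cases h : j < l.length ∧ PySem.Chars.isdigit (l.getD j ' ')
  · rw [pvTakeD, if_pos h]
    have := pvTakeD_ge l (j + 1)
    omega
  · rw [pvTakeD, if_neg h]
termination_by l.length - j

theorem pvTakeD_spec (l : List Char) (j : Nat) (_hj : j ≤ l.length) :
    (l.drop j).take (pvTakeD l l.length j - j) =
      (l.drop j).takeWhile PySem.Chars.isdigit := by
  by_cases h : j < l.length ∧ PySem.Chars.isdigit (l.getD j ' ')
  · obtain ⟨h1, h2⟩ := h
    have hg : l.getD j ' ' = l[j] := List.getD_eq_getElem l ' ' h1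
    have hdrop : l.drop j = l[j] :: l.drop (j + 1) := (List.getElem_cons_drop h1).symm
    have hge := pvTakeD_ge l (j + 1)
    have hEq : pvTakeD l l.length j = pvTakeD l l.length (j + 1) := by
      rw [pvTakeD, if_pos ⟨h1, h2⟩]
    have ih := pvTakeD_spec l (j + 1) (by omega)
    rw [hEq, hdrop, List.takeWhile_cons]
    have hs : pvTakeD l l.length (j + 1) - j = (pvTakeD l l.length (j + 1) - (j + 1)) + 1 := by
      omega
    rw [hs, List.take_succ_cons, ih]
    simp [hg ▸ h2]
  · have hEq : pvTakeD l l.length j = j := by rw [pvTakeD, if_neg h]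
    rw [hEq]
    simp only [Nat.sub_self, List.take_zero]
    rcases Nat.lt_or_ge j l.length with h1 | h1
    · have h2 : ¬ PySem.Chars.isdigit (l.getD j ' ') := by tauto
      have hg : l.getD j ' ' = l[j] := List.getD_eq_getElem l ' ' h1
      rw [(List.getElem_cons_drop h1).symm, List.takeWhile_cons]
      simp [hg ▸ h2]
    · simp [List.drop_eq_nil_of_le h1]
termination_by l.length - j

-- the two programs' list-level cores agree
theorem pv_core (l : List Char) :
    pvLoopA l [] =
      PySem.List.slice l (some ((pvSkipND l l.length 0 : Nat) : Int))
        (some ((pvTakeD l l.length (pvSkipND l l.length 0) : Nat) : Int)) := by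
  obtain ⟨s1, s2, s3⟩ := pvSkipND_spec l 0 (Nat.zero_le _)
  rw [List.drop_zero] at s3
  rw [PySem.List.slice_natCast, pvLoopA_nil, ← s3]
  exact (pvTakeD_spec l _ s2).symm

-- ===== VERDICT (by name: the statement is the Claim_ definition above) =====
theorem extract_rsci_rank_py_spec : Claim_equal_extract_rsci_rank_py := by
  intro page_text _
  unfold Spec_extract_rsci_rank_py extract_rsci_rank_py extract_rsci_rank_py_alt
  simp only []
  split
  · rfl
  · exact congrArg String.ofList (pv_core _)
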